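-- pv_equiv track=rewrite | github.com/gkommi/CS-1301 | HW5/HW05.py | fastFood
-- ===== SOURCE A (Python) =====
-- def fastFood(foods, costs):
--     list1 = []
--     foods.sort()
--     for one, first in foods:
--         tup1 = ()
--         total = 0
--         for two, second in foods:
--             if one == two:
--                 for i,cost in costs:
--                     if i == second:
--                         total += cost
--                         break
--         tup1 = tup1 + (one,total)
--         if tup1 not in list1:
--             list1.append(tup1)
--     return list1
-- ===== SOURCE B (Python) =====
-- def fastFood(foods, costs):
--     price = {}
--     for name, c in costs:
--         price.setdefault(name, c)
--     foods.sort()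
--     totals = {}
--     for cat, item in foods:
--         totals[cat] = totals.get(cat, 0) + price.get(item, 0)
--     return list(totals.items())
-- ===== Notes on version B (the rewrite author's own statement) =====
-- stated objective: faster
-- what changed: Replaces the triple nested scan (for each food, rescan all foods and linearly search costs) by a first-wins cost dict built once plus a single grouping pass over the sorted foods accumulating per-category totals in an insertion-ordered dict.
import Mathlib
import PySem

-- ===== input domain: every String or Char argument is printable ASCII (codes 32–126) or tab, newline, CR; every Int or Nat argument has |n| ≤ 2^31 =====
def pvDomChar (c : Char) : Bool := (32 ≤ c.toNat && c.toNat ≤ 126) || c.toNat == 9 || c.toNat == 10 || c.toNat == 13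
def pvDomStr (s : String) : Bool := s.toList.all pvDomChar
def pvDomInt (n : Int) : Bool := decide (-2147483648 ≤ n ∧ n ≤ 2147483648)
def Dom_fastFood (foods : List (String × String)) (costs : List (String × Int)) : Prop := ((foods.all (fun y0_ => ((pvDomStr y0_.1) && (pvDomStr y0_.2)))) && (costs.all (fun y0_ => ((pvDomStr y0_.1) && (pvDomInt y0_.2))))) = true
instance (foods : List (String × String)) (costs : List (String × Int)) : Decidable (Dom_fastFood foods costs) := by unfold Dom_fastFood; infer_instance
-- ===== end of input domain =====

-- B replaces A's triple nested scan by a first-wins cost dict plus one grouping pass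
-- over the sorted foods (objective: faster). Both A and B sort `foods` in place (same
-- side effect); the equivalence proved here is about the return value.


-- ===== PORT A =====
-- inner loop 'for i,cost in costs: if i == second: total += cost; break'
-- (adds the FIRST matching cost, nothing if no match)
def costFirst (costs : List (String × Int)) (second : String) : Int :=
  match costs with
  | [] => 0
  | (i, c) :: t => if i == second then c else costFirst t second

def fastFood (foods : List (String × String)) (costs : List (String × Int)) : List (String × Int) :=
  let fs := PySem.List.sorted2 foods (fun x => x.1) (fun x => x.2) false
  fs.foldl (fun list1 p =>
    let total : Int := fs.foldl (fun total q =>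
      if p.1 == q.1 then total + costFirst costs q.2 else total) 0
    let tup1 := (p.1, total)
    if tup1 ∈ list1 then list1 else list1 ++ [tup1]) []

-- ===== PORT B =====
def fastFood_alt (foods : List (String × String)) (costs : List (String × Int)) : List (String × Int) :=
  let price := costs.foldl (fun d p => d.setdefault p.1 p.2) PySem.Dict.empty
  let fs := PySem.List.sorted2 foods (fun x => x.1) (fun x => x.2) false
  let totals := fs.foldl (fun d p =>
    d.insert p.1 (d.getD p.1 0 + price.getD p.2 0)) PySem.Dict.empty
  totals.items

-- ===== PRECONDITION & SPEC =====
def Spec_fastFood (foods : List (String × String)) (costs : List (String × Int)) (out : List (String × Int)) : Prop := out = fastFood_alt foods costs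
instance (foods : List (String × String)) (costs : List (String × Int)) (out : List (String × Int)) : Decidable (Spec_fastFood foods costs out) := by unfold Spec_fastFood; infer_instance

-- ===== CLAIM (what is proved, stated in full; the proofs are below) =====
def Claim_equal_fastFood : Prop := ∀ (foods : List (String × String)) (costs : List (String × Int)), Dom_fastFood foods costs → Spec_fastFood foods costs (fastFood foods costs)

-- ===== LEMMAS AND PROOFS =====

-- the setdefault-built dict looks up the FIRST matching cost
theorem getD_foldl_setdefault (costs : List (String × Int)) (d : PySem.Dict String Int) (x : String) :
    (costs.foldl (fun d p => d.setdefault p.1 p.2) d).getD x 0 =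
      match d.get? x with
      | some v => v
      | none => costFirst costs x := by
  induction costs generalizing d with
  | nil => simp [PySem.Dict.getD_eq_get?_getD]; cases d.get? x <;> simp [costFirst]
  | cons p t ih =>
    simp only [List.foldl_cons, ih]
    by_cases hc : d.contains p.1 = true
    · rw [PySem.Dict.setdefault_of_contains d p.2 hc]
      rw [PySem.Dict.contains_eq_isSome_get?] at hc
      cases hget : d.get? x with
      | some v => simp
      | none =>
        simp only [costFirst]
        by_cases hx : p.1 == x
        · have : d.get? p.1 = d.get? x := by rw [eq_of_beq hx]
          cases h' : d.get? p.1 <;> simp_all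
        · simp [hx]
    · rw [PySem.Dict.setdefault_of_not_contains d p.2 (by simpa using hc)]
      rw [PySem.Dict.get?_insert]
      by_cases hx : x = p.1
      · subst hx
        rw [PySem.Dict.contains_eq_isSome_get?] at hc
        cases h' : d.get? p.1 <;> simp_all [costFirst]
      · simp only [if_neg hx]
        cases d.get? x with
        | some v => simp
        | none => simp [costFirst, show (p.1 == x) = false from by simpa using (Ne.symm hx)]

-- the grouping fold's value at a category is the sum of that category's item costs
theorem getD_group_fold (s : List (String × String)) (g : String → Int)
    (d : PySem.Dict String Int) (c : String) :
    (s.foldl (fun d p => d.insert p.1 (d.getD p.1 0 + g p.2)) d).getD c 0 =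
      d.getD c 0 + ((s.filter (fun q => q.1 == c)).map (fun q => g q.2)).sum := by
  induction s generalizing d with
  | nil => simp
  | cons p t ih =>
    simp only [List.foldl_cons, ih, List.filter_cons]
    by_cases hx : p.1 == c
    · rw [PySem.Dict.getD_insert]
      simp [eq_of_beq hx, add_assoc]
    · rw [PySem.Dict.getD_insert]
      simp [hx, show ¬ c = p.1 from fun h => by simp [h] at hx]

-- dedup-by-append of mapped values commutes with the map when the function is injective
theorem ofList_map_inj {α β : Type} [BEq α] [LawfulBEq α] [BEq β] [LawfulBEq β] (g : α → β)
    (hg : Function.Injective g) (xs : List α) (acc : List α) :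
    (xs.map g).foldl PySem.Set.add (acc.map g) = (xs.foldl PySem.Set.add acc).map g := by
  induction xs generalizing acc with
  | nil => simp
  | cons x t ih =>
    simp only [List.map_cons, List.foldl_cons]
    rw [show PySem.Set.add (acc.map g) (g x) = (PySem.Set.add acc x).map g by
      simp only [PySem.Set.add, PySem.Set.contains]
      by_cases hm : x ∈ acc
      · simp [hm, List.mem_map_of_mem]
      · have : g x ∉ acc.map g := by
          intro h; obtain ⟨y, hy, hgy⟩ := List.mem_map.mp h
          exact hm (hg hgy ▸ hy)
        simp [hm, this]]
    exact ih _

theorem fastFood_spec_aux (foods : List (String × String)) (costs : List (String × Int)) :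
    fastFood foods costs = fastFood_alt foods costs := by
  unfold fastFood fastFood_alt
  set fs := PySem.List.sorted2 foods (fun x => x.1) (fun x => x.2) false with hfs
  set price := costs.foldl (fun d p => d.setdefault p.1 p.2) PySem.Dict.empty with hprice
  -- the common per-category total
  set T : String → Int := fun c => ((fs.filter (fun q => q.1 == c)).map (fun q => costFirst costs q.2)).sum with hT
  have hpg : ∀ x, price.getD x 0 = costFirst costs x := by
    intro x
    rw [hprice, getD_foldl_setdefault]
    simp [PySem.Dict.get?_empty]
  -- B side: the totals dict
  set totals := fs.foldl (fun d p => d.insert p.1 (d.getD p.1 0 + price.getD p.2 0)) PySem.Dict.empty with htot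
  have hkeys : totals.keys = PySem.Set.ofList (fs.map (fun p => p.1)) := by
    rw [htot, PySem.Dict.keys_foldl_insert_key]
    simp [PySem.Set.update, PySem.Set.ofList_eq_foldl]
  have hnd : totals.keys.Nodup := by
    rw [htot]
    exact PySem.Dict.nodup_keys_foldl_insert_key _ _ _ _ PySem.Dict.nodup_keys_empty
  have hget : ∀ c, totals.getD c 0 = T c := by
    intro c
    rw [htot, getD_group_fold fs (fun x => price.getD x 0)]
    simp [hT, hpg]
  have hB : totals.items = (PySem.Set.ofList (fs.map (fun p => p.1))).map (fun c => (c, T c)) := by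
    rw [PySem.Dict.items_eq_map_keys totals hnd 0, hkeys]
    exact List.map_congr_left (fun k _ => by rw [hget])
  rw [hB]
  -- A side: the dedup fold equals Set.ofList of the mapped list
  have hstep : ∀ p ∈ fs, ∀ (acc : List (String × Int)),
      (if (p.1, fs.foldl (fun total q =>
            if p.1 == q.1 then total + costFirst costs q.2 else total) 0) ∈ acc then acc
       else acc ++ [(p.1, fs.foldl (fun total q =>
            if p.1 == q.1 then total + costFirst costs q.2 else total) 0)]) =
      PySem.Set.add acc (p.1, T p.1) := by
    intro p _ acc
    have htot' : fs.foldl (fun total q =>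
        if p.1 == q.1 then total + costFirst costs q.2 else total) 0 = T p.1 := by
      rw [PySem.List.foldl_if_eq_foldl_filter, PySem.List.foldl_add]
      rw [hT, List.filter_congr (fun q _ => by rw [Bool.beq_comm])]
      simp
    simp only [htot']
    simp only [PySem.Set.add, PySem.Set.contains]
    by_cases hm : (p.1, T p.1) ∈ acc <;> simp [hm]
  show fs.foldl (fun list1 p =>
      if (p.1, fs.foldl (fun total q =>
            if p.1 == q.1 then total + costFirst costs q.2 else total) 0) ∈ list1 then list1
      else list1 ++ [(p.1, fs.foldl (fun total q =>
            if p.1 == q.1 then total + costFirst costs q.2 else total) 0)]) [] = _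
  rw [PySem.List.foldl_congr_mem' fs _ _ [] hstep]
  have := ofList_map_inj (fun c => (c, T c))
    (fun a b h => by simpa using congrArg Prod.fst h) (fs.map (fun p => p.1)) []
  simp only [List.map_nil, List.map_map] at this
  rw [← List.foldl_map, PySem.Set.ofList_eq_foldl]
  exact this

-- ===== VERDICT (by name: the statement is the Claim_ definition above) =====
theorem fastFood_spec : Claim_equal_fastFood := by
  intro foods costs _
  exact fastFood_spec_aux foods costs
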